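-- pv_equiv track=rewrite | github.com/IGULEWSKI/wezascie_python | wężaście (Python)/Ćwiczenia/ćw4wdi.py | zdegen
-- ===== SOURCE A (Python) =====
-- def zdegen(tab)->int:
--     l=0
--     for i in range(len(tab)):
--         for j in range(i+1,len(tab)):
--             for k in range(j+1,len(tab)):
--                 if tab[i]+tab[j]<=tab[k] or tab[i]+tab[k]<=tab[j] or tab[k]+tab[j]<=tab[i]:
--                     l+=1
--                 #end if
--             #end for
--         #end for
--     #end for
--     return l
-- ===== SOURCE B (Python) =====
-- def zdegen(tab) -> int:
--     # sort + two-pointer: count valid (strict) triangles, subtract from C(n,3)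
--     t = sorted(tab)
--     n = len(t)
--     valid = 0
--     for k in range(2, n):
--         i = 0
--         j = k - 1
--         while i < j:
--             if t[i] + t[j] > t[k]:
--                 valid += j - i
--                 j -= 1
--             else:
--                 i += 1
--     return n * (n - 1) * (n - 2) // 6 - valid
-- ===== Notes on version B (the rewrite author's own statement) =====
-- stated objective: faster
-- what changed: Replaces the O(n^3) triple loop that tests every index triple with sort + per-apex two-pointer counting of valid triangles, returning C(n,3) minus the valid count.
import Mathlib
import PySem

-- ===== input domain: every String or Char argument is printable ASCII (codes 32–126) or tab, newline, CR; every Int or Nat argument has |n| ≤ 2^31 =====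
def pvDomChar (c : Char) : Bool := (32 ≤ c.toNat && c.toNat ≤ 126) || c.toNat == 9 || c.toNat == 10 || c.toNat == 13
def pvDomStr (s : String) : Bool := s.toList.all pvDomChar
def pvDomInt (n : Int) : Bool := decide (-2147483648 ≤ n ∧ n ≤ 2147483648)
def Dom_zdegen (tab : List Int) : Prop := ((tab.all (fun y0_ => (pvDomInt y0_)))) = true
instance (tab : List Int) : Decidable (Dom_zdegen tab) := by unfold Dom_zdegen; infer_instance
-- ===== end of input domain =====

-- B replaces A's O(n^3) triple loop by sort + two-pointer triangle counting (degenerate = C(n,3) - valid).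

-- ===== PORT A =====
def zdegen (tab : List Int) : Int :=
  (PySem.List.pyRange 0 (PySem.List.len tab)).foldl (fun l i =>
    (PySem.List.pyRange (i + 1) (PySem.List.len tab)).foldl (fun l j =>
      (PySem.List.pyRange (j + 1) (PySem.List.len tab)).foldl (fun l k =>
        if PySem.List.pyGetD tab i 0 + PySem.List.pyGetD tab j 0 ≤ PySem.List.pyGetD tab k 0
            ∨ PySem.List.pyGetD tab i 0 + PySem.List.pyGetD tab k 0 ≤ PySem.List.pyGetD tab j 0
            ∨ PySem.List.pyGetD tab k 0 + PySem.List.pyGetD tab j 0 ≤ PySem.List.pyGetD tab i 0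
        then l + 1 else l) l) l) 0

-- ===== PORT B =====
-- the inner 'while i < j' loop of Source B; structural recursion on the gap j - i
-- (the fuel (j - i).toNat is exactly the loop variant, so it never runs out)
def twoPtrGo (t : List Int) (x : Int) : Nat → Int → Int → Int → Int
  | 0, _, _, valid => valid
  | m + 1, i, j, valid =>
    if i < j then
      if PySem.List.pyGetD t i 0 + PySem.List.pyGetD t j 0 > x then
        twoPtrGo t x m i (j - 1) (valid + (j - i))
      else
        twoPtrGo t x m (i + 1) j valid
    else valid

def twoPtr (t : List Int) (x i j valid : Int) : Int :=
  twoPtrGo t x (j - i).toNat i j valid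

def zdegen_alt (tab : List Int) : Int :=
  let t := PySem.List.sorted tab (fun x => x) false
  let n : Int := PySem.List.len t
  let valid := (PySem.List.pyRange 2 n).foldl
    (fun valid k => twoPtr t (PySem.List.pyGetD t k 0) 0 (k - 1) valid) 0
  PySem.Int.floordiv (n * (n - 1) * (n - 2)) 6 - valid

-- ===== PRECONDITION & SPEC =====
def Spec_zdegen (tab : List Int) (out : Int) : Prop := out = zdegen_alt tab
instance (tab : List Int) (out : Int) : Decidable (Spec_zdegen tab out) := by unfold Spec_zdegen; infer_instance

-- ===== CLAIM (what is proved, stated in full; the proofs are below) =====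
def Claim_equal_zdegen : Prop := ∀ (tab : List Int), Dom_zdegen tab → Spec_zdegen tab (zdegen tab)

-- ===== LEMMAS AND PROOFS =====

-- degenerate-triple test exactly as A writes it
def pB (a b c : Int) : Bool := decide (a + b ≤ c ∨ a + c ≤ b ∨ c + b ≤ a)
-- valid (strict) triangle with c the last element
def vB (a b c : Int) : Bool := decide (c < a + b)

-- count of ordered pairs (y before z) of l with q y z
def cp (q : Int → Int → Bool) : List Int → Nat
  | [] => 0
  | y :: ys => ys.countP (q y) + cp q ys

-- count of ordered triples of l with p
def c3 (p : Int → Int → Int → Bool) : List Int → Nat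
  | [] => 0
  | x :: xs => cp (p x) xs + c3 p xs

-- generic "suffix accumulator" for A's index loops
def cpGen (g : Int → List Int → Int) : List Int → Int
  | [] => 0
  | y :: ys => g y ys + cpGen g ys

def iteCnt (xi xj : Int) (y : Int) (_ : List Int) : Int :=
  if xi + xj ≤ y ∨ xi + y ≤ xj ∨ y + xj ≤ xi then 1 else 0
def gMid (xi : Int) (y : Int) (ys : List Int) : Int := cpGen (iteCnt xi y) ys
def gOut (x : Int) (xs : List Int) : Int := cpGen (gMid x) xs

theorem loopG (t : List Int) (g : Int → List Int → Int) :
    ∀ (m : Nat) (a init : Int), 0 ≤ a → a.toNat + m = t.length →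
    (PySem.List.pyRange a (PySem.List.len t)).foldl
        (fun l j => l + g (PySem.List.pyGetD t j 0) (t.drop (j + 1).toNat)) init
      = init + cpGen g (t.drop a.toNat) := by
  intro m
  induction m with
  | zero =>
      intro a init ha hlen
      have hge : PySem.List.len t ≤ a := by rw [PySem.List.len_eq]; omega
      rw [PySem.List.pyRange_one_eq_nil hge,
        List.drop_eq_nil_of_le (show t.length ≤ a.toNat by omega)]
      simp [cpGen]
  | succ m ih =>
      intro a init ha hlen
      have hlt : a < PySem.List.len t := by rw [PySem.List.len_eq]; omega
      rw [PySem.List.pyRange_one_cons hlt]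
      simp only [List.foldl_cons]
      rw [ih (a + 1) _ (by omega) (by omega)]
      rw [List.drop_eq_getElem_cons (show a.toNat < t.length by omega)]
      simp only [cpGen]
      rw [PySem.List.pyGetD_eq_getElem t 0 ha (by rw [← PySem.List.len_eq]; exact hlt)]
      have h1 : (a + 1).toNat = a.toNat + 1 := by omega
      rw [h1, add_assoc]

theorem cpGen_iteCnt (xi xj : Int) (l : List Int) :
    cpGen (iteCnt xi xj) l = (l.countP (pB xi xj) : Int) := by
  induction l with
  | nil => simp [cpGen]
  | cons y ys ih =>
      simp only [cpGen, iteCnt, ih, List.countP_cons]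
      by_cases h : xi + xj ≤ y ∨ xi + y ≤ xj ∨ y + xj ≤ xi
      · rw [if_pos h]
        have hb : pB xi xj y = true := by simp only [pB, decide_eq_true_eq]; exact h
        simp [hb]
        omega
      · rw [if_neg h]
        have hb : pB xi xj y = false := by
          simp only [pB, decide_eq_false_iff_not]; exact h
        simp [hb]

theorem cpGen_gMid (x : Int) (l : List Int) :
    cpGen (gMid x) l = (cp (pB x) l : Int) := by
  induction l with
  | nil => simp [cpGen, cp]
  | cons y ys ih =>
      simp only [cpGen, gMid, cpGen_iteCnt, ih, cp]
      push_cast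
      ring

theorem cpGen_gOut (l : List Int) : cpGen gOut l = (c3 pB l : Int) := by
  induction l with
  | nil => simp [cpGen, c3]
  | cons x xs ih =>
      simp only [cpGen, gOut, cpGen_gMid, ih, c3]
      push_cast
      ring

theorem zdegen_eq_c3 (tab : List Int) : zdegen tab = (c3 pB tab : Int) := by
  unfold zdegen
  have houter : ∀ (acc : Int), ∀ i ∈ PySem.List.pyRange 0 (PySem.List.len tab),
      (PySem.List.pyRange (i + 1) (PySem.List.len tab)).foldl (fun l j =>
        (PySem.List.pyRange (j + 1) (PySem.List.len tab)).foldl (fun l k =>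
          if PySem.List.pyGetD tab i 0 + PySem.List.pyGetD tab j 0 ≤ PySem.List.pyGetD tab k 0
              ∨ PySem.List.pyGetD tab i 0 + PySem.List.pyGetD tab k 0 ≤ PySem.List.pyGetD tab j 0
              ∨ PySem.List.pyGetD tab k 0 + PySem.List.pyGetD tab j 0 ≤ PySem.List.pyGetD tab i 0
          then l + 1 else l) l) acc
      = acc + gOut (PySem.List.pyGetD tab i 0) (tab.drop (i + 1).toNat) := by
    intro acc i hi
    obtain ⟨hi0, hi1⟩ := PySem.List.mem_pyRange_one.mp hi
    rw [PySem.List.len_eq] at hi1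
    have hmid : ∀ (acc' : Int), ∀ j ∈ PySem.List.pyRange (i + 1) (PySem.List.len tab),
        (PySem.List.pyRange (j + 1) (PySem.List.len tab)).foldl (fun l k =>
          if PySem.List.pyGetD tab i 0 + PySem.List.pyGetD tab j 0 ≤ PySem.List.pyGetD tab k 0
              ∨ PySem.List.pyGetD tab i 0 + PySem.List.pyGetD tab k 0 ≤ PySem.List.pyGetD tab j 0
              ∨ PySem.List.pyGetD tab k 0 + PySem.List.pyGetD tab j 0 ≤ PySem.List.pyGetD tab i 0
          then l + 1 else l) acc'
        = acc' + gMid (PySem.List.pyGetD tab i 0) (PySem.List.pyGetD tab j 0)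
            (tab.drop (j + 1).toNat) := by
      intro acc' j hj
      obtain ⟨hj0, hj1⟩ := PySem.List.mem_pyRange_one.mp hj
      rw [PySem.List.len_eq] at hj1
      have hstep : (PySem.List.pyRange (j + 1) (PySem.List.len tab)).foldl (fun l k =>
          if PySem.List.pyGetD tab i 0 + PySem.List.pyGetD tab j 0 ≤ PySem.List.pyGetD tab k 0
              ∨ PySem.List.pyGetD tab i 0 + PySem.List.pyGetD tab k 0 ≤ PySem.List.pyGetD tab j 0
              ∨ PySem.List.pyGetD tab k 0 + PySem.List.pyGetD tab j 0 ≤ PySem.List.pyGetD tab i 0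
          then l + 1 else l) acc'
          = (PySem.List.pyRange (j + 1) (PySem.List.len tab)).foldl (fun l k =>
              l + iteCnt (PySem.List.pyGetD tab i 0) (PySem.List.pyGetD tab j 0)
                (PySem.List.pyGetD tab k 0) (tab.drop (k + 1).toNat)) acc' := by
        apply PySem.List.foldl_congr_mem
        intro a'' k _
        simp only [iteCnt]
        by_cases h : PySem.List.pyGetD tab i 0 + PySem.List.pyGetD tab j 0 ≤ PySem.List.pyGetD tab k 0
            ∨ PySem.List.pyGetD tab i 0 + PySem.List.pyGetD tab k 0 ≤ PySem.List.pyGetD tab j 0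
            ∨ PySem.List.pyGetD tab k 0 + PySem.List.pyGetD tab j 0 ≤ PySem.List.pyGetD tab i 0
        · rw [if_pos h, if_pos h]
        · rw [if_neg h, if_neg h, add_zero]
      rw [hstep,
        loopG tab (iteCnt (PySem.List.pyGetD tab i 0) (PySem.List.pyGetD tab j 0))
          (tab.length - (j + 1).toNat) (j + 1) acc' (by omega) (by omega)]
      rfl
    rw [PySem.List.foldl_congr_mem _ _ _ acc hmid,
      loopG tab (gMid (PySem.List.pyGetD tab i 0))
        (tab.length - (i + 1).toNat) (i + 1) acc (by omega) (by omega)]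
    rfl
  rw [PySem.List.foldl_congr_mem _ _ _ 0 houter,
    loopG tab gOut tab.length 0 0 (by omega) (by omega)]
  simp [cpGen_gOut]

theorem cp_perm (q : Int → Int → Bool) (hq : ∀ y z, q y z = q z y)
    {l1 l2 : List Int} (h : l1.Perm l2) : cp q l1 = cp q l2 := by
  induction h with
  | nil => rfl
  | cons x h ih => simp only [cp, ih, (h.countP_eq _)]
  | swap x y l =>
      simp only [cp, List.countP_cons]
      rw [hq y x]
      cases h : q x y <;> simp <;> omega
  | trans h1 h2 ih1 ih2 => exact ih1.trans ih2

theorem c3_perm (p : Int → Int → Int → Bool)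
    (h12 : ∀ a b c, p a b c = p b a c) (h23 : ∀ a b c, p a b c = p a c b)
    {l1 l2 : List Int} (h : l1.Perm l2) : c3 p l1 = c3 p l2 := by
  induction h with
  | nil => rfl
  | cons x h ih =>
      simp only [c3, ih, cp_perm (p x) (fun y z => h23 x y z) h]
  | swap x y l =>
      have hcnt : l.countP (p y x) = l.countP (p x y) :=
        List.countP_congr (fun z _ => by rw [h12 y x z])
      simp only [c3, cp]
      rw [hcnt]
      omega
  | trans h1 h2 ih1 ih2 => exact ih1.trans ih2

theorem cp_sorted (x : Int) (l : List Int) (hx : ∀ y ∈ l, x ≤ y)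
    (hl : l.Pairwise (· ≤ ·)) : cp (pB x) l = cp (fun y z => !vB x y z) l := by
  induction l with
  | nil => rfl
  | cons y ys ih =>
      rcases List.pairwise_cons.mp hl with ⟨hy, hys⟩
      have hxy : x ≤ y := hx y (by simp)
      have hcnt : ys.countP (pB x y) = ys.countP (fun z => !vB x y z) :=
        List.countP_congr (fun z hz => by
          have hyz : y ≤ z := hy z hz
          simp only [pB, vB, decide_eq_true_eq, Bool.not_eq_true', decide_eq_false_iff_not,
            not_lt]
          omega)
      simp only [cp, hcnt, ih (fun a ha => hx a (by simp [ha])) hys]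

theorem c3_sorted_pB (l : List Int) (hl : l.Pairwise (· ≤ ·)) :
    c3 pB l = c3 (fun a b c => !vB a b c) l := by
  induction l with
  | nil => rfl
  | cons x xs ih =>
      rcases List.pairwise_cons.mp hl with ⟨hx, hxs⟩
      simp only [c3, cp_sorted x xs hx hxs, ih hxs]

theorem countP_not_aux (q : Int → Bool) (l : List Int) :
    l.countP q + l.countP (fun z => !q z) = l.length := by
  induction l with
  | nil => simp
  | cons y ys ih =>
      simp only [List.countP_cons, List.length_cons]
      cases h : q y <;> simp <;> omega

theorem cp_compl (q : Int → Int → Bool) (l : List Int) :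
    cp q l + cp (fun y z => !q y z) l = l.length.choose 2 := by
  induction l with
  | nil => simp [cp]
  | cons y ys ih =>
      have hc := countP_not_aux (q y) ys
      have hch : (ys.length + 1).choose 2 = ys.length.choose 1 + ys.length.choose 2 :=
        Nat.choose_succ_succ ys.length 1
      simp only [cp, List.length_cons]
      rw [hch, Nat.choose_one_right]
      omega

theorem c3_compl (p : Int → Int → Int → Bool) (l : List Int) :
    c3 p l + c3 (fun a b c => !p a b c) l = l.length.choose 3 := by
  induction l with
  | nil => simp [c3]
  | cons x xs ih =>
      have hc := cp_compl (p x) xs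
      have hch : (xs.length + 1).choose 3 = xs.length.choose 2 + xs.length.choose 3 :=
        Nat.choose_succ_succ xs.length 2
      simp only [c3, List.length_cons]
      rw [hch]
      omega

theorem cp_append_singleton (q : Int → Int → Bool) (l : List Int) (c : Int) :
    cp q (l ++ [c]) = cp q l + l.countP (fun y => q y c) := by
  induction l with
  | nil => simp [cp]
  | cons y ys ih =>
      simp only [List.cons_append, cp, ih, List.countP_append, List.countP_cons]
      cases hq : q y c <;> simp <;> omega

theorem c3_append_singleton (p : Int → Int → Int → Bool) (l : List Int) (c : Int) :
    c3 p (l ++ [c]) = c3 p l + cp (fun y z => p y z c) l := by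
  induction l with
  | nil => simp [c3, cp]
  | cons x xs ih =>
      simp only [List.cons_append, c3, ih, cp, cp_append_singleton]
      omega

theorem cp_small (q : Int → Int → Bool) (l : List Int) (h : l.length ≤ 1) : cp q l = 0 := by
  match l with
  | [] => rfl
  | [y] => simp [cp]
  | y :: z :: r => simp at h

theorem mono_getElem (t : List Int) (ht : t.Pairwise (· ≤ ·)) (p q : Nat)
    (hp : p < t.length) (hq : q < t.length) (hpq : p ≤ q) : t[p] ≤ t[q] := by
  rcases Nat.eq_or_lt_of_le hpq with h | h
  · subst h; exact le_refl _
  · exact List.pairwise_iff_getElem.mp ht p q hp hq h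

theorem twoPtr_spec (t : List Int) (ht : t.Pairwise (· ≤ ·)) (x : Int) :
    ∀ (m : Nat) (i j v : Int), 0 ≤ i → j < (t.length : Int) → (j - i).toNat = m →
    twoPtr t x i j v
      = v + (cp (fun y z => decide (x < y + z)) ((t.drop i.toNat).take (j + 1 - i).toNat) : Int) := by
  intro m
  induction m with
  | zero =>
      intro i j v h0 hj hm
      rw [twoPtr, hm]
      simp only [twoPtrGo]
      have hz : cp (fun y z => decide (x < y + z)) ((t.drop i.toNat).take (j + 1 - i).toNat) = 0 :=
        cp_small _ _ (le_trans (List.length_take_le _ _) (by omega))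
      simp [hz]
  | succ m ih =>
      intro i j v h0 hj hm
      have hij : i < j := by omega
      have hin : i.toNat < t.length := by omega
      have hjn : j.toNat < t.length := by omega
      rw [twoPtr, hm]
      simp only [twoPtrGo]
      rw [if_pos hij,
        PySem.List.pyGetD_eq_getElem t 0 h0 (by omega),
        PySem.List.pyGetD_eq_getElem t 0 (by omega) (by omega)]
      have hgo1 : twoPtrGo t x m i (j - 1) (v + (j - i)) = twoPtr t x i (j - 1) (v + (j - i)) := by
        rw [twoPtr, show (j - 1 - i).toNat = m by omega]
      have hgo2 : twoPtrGo t x m (i + 1) j v = twoPtr t x (i + 1) j v := by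
        rw [twoPtr, show (j - (i + 1)).toNat = m by omega]
      by_cases hc : t[i.toNat] + t[j.toNat] > x
      · rw [if_pos hc, hgo1, ih i (j - 1) (v + (j - i)) h0 (by omega) (by omega)]
        have h1 : (j + 1 - i).toNat = (j - i).toNat + 1 := by omega
        have hlen : (j - i).toNat < (t.drop i.toNat).length := by
          rw [List.length_drop]; omega
        have hidx : i.toNat + (j - i).toNat = j.toNat := by omega
        have hseg : (t.drop i.toNat).take (j + 1 - i).toNat
            = (t.drop i.toNat).take (j - i).toNat ++ [t[j.toNat]] := by
          rw [h1, List.take_add_one, List.getElem?_eq_getElem hlen]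
          rw [List.getElem_drop, Option.toList_some]
          simp only [hidx]
        have h2 : (j - 1 + 1 - i) = j - i := by omega
        rw [h2, hseg, cp_append_singleton]
        have hall : ((t.drop i.toNat).take (j - i).toNat).countP
            (fun y => decide (x < y + t[j.toNat]))
            = ((t.drop i.toNat).take (j - i).toNat).length := by
          rw [List.countP_eq_length]
          intro y hy
          obtain ⟨q, hq, hqy⟩ := List.mem_iff_getElem.mp hy
          have hql : q < (t.drop i.toNat).length := by
            have h3 : (List.take (j - i).toNat (t.drop i.toNat)).length
                = min ((j - i).toNat) ((t.drop i.toNat).length) := List.length_take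
            omega
          have hql' : i.toNat + q < t.length := by
            rw [List.length_drop] at hql; omega
          rw [List.getElem_take, List.getElem_drop] at hqy
          have hle : t[i.toNat] ≤ t[i.toNat + q] :=
            mono_getElem t ht i.toNat (i.toNat + q) hin hql' (by omega)
          subst hqy
          simp only [decide_eq_true_eq]
          omega
        rw [hall, List.length_take, List.length_drop]
        have hmin : min (j - i).toNat (t.length - i.toNat) = (j - i).toNat := by omega
        rw [hmin]
        push_cast
        omega
      · rw [if_neg hc, hgo2, ih (i + 1) j v (by omega) hj (by omega)]
        have h1 : (j + 1 - i).toNat = (j - i).toNat + 1 := by omega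
        have h2 : (j + 1 - (i + 1)) = j - i := by omega
        have h3 : (i + 1).toNat = i.toNat + 1 := by omega
        have hseg : (t.drop i.toNat).take (j + 1 - i).toNat
            = t[i.toNat] :: (t.drop (i.toNat + 1)).take (j - i).toNat := by
          rw [h1, List.drop_eq_getElem_cons hin, List.take_succ_cons]
        rw [h2, h3, hseg]
        have hzero : ((t.drop (i.toNat + 1)).take (j - i).toNat).countP
            (fun z => decide (x < t[i.toNat] + z)) = 0 := by
          rw [List.countP_eq_zero]
          intro z hz
          obtain ⟨q, hq, hqz⟩ := List.mem_iff_getElem.mp hz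
          have h4 : (List.take (j - i).toNat (t.drop (i.toNat + 1))).length
              = min ((j - i).toNat) ((t.drop (i.toNat + 1)).length) := List.length_take
          have hql : q < (t.drop (i.toNat + 1)).length := by omega
          have hqb : q < (j - i).toNat := by omega
          have hql' : i.toNat + 1 + q < t.length := by
            rw [List.length_drop] at hql; omega
          rw [List.getElem_take, List.getElem_drop] at hqz
          have hle : t[i.toNat + 1 + q] ≤ t[j.toNat] :=
            mono_getElem t ht (i.toNat + 1 + q) j.toNat hql' hjn (by omega)
          rw [← hqz]
          simp only [decide_eq_true_eq, not_lt]
          omega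
        simp only [cp, hzero, Nat.zero_add]

theorem c3_small (p : Int → Int → Int → Bool) (l : List Int) (h : l.length ≤ 2) :
    c3 p l = 0 := by
  match l with
  | [] => rfl
  | [a] => simp [c3, cp]
  | [a, b] => simp [c3, cp]
  | a :: b :: d :: r => simp at h

theorem valid_sum (t : List Int) :
    ((PySem.List.pyRange 2 (t.length : Int)).map
        (fun k => (cp (fun y z => decide (PySem.List.pyGetD t k 0 < y + z)) (t.take k.toNat) : Int))).sum
      = (c3 vB t : Int) := by
  induction t using List.reverseRecOn with
  | nil => simp [PySem.List.pyRange_one_eq_nil (by norm_num : (0:ℤ) ≤ 2), c3]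
  | append_singleton t c ih =>
      rcases Nat.lt_or_ge (t.length + 1) 3 with hsmall | hbig
      · have hnil : PySem.List.pyRange 2 (((t ++ [c]).length : Nat) : Int) = [] :=
          PySem.List.pyRange_one_eq_nil (by simp; omega)
        rw [hnil, c3_small vB (t ++ [c]) (by simp; omega)]
        simp
      · have hlen : (((t ++ [c]).length : Nat) : Int) = (t.length : Int) + 1 := by
          simp
        rw [hlen, PySem.List.pyRange_one_succ_right (by exact_mod_cast (by omega : 2 ≤ t.length))]
        rw [List.map_append, List.sum_append]
        have hmap : ∀ k ∈ PySem.List.pyRange 2 ((t.length : Nat) : Int),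
            (cp (fun y z => decide (PySem.List.pyGetD (t ++ [c]) k 0 < y + z))
                ((t ++ [c]).take k.toNat) : Int)
            = (cp (fun y z => decide (PySem.List.pyGetD t k 0 < y + z)) (t.take k.toNat) : Int) := by
          intro k hk
          obtain ⟨hk2, hkl⟩ := PySem.List.mem_pyRange_one.mp hk
          have h1 : (t ++ [c]).take k.toNat = t.take k.toNat :=
            List.take_append_of_le_length (by omega)
          have h2 : PySem.List.pyGetD (t ++ [c]) k 0 = PySem.List.pyGetD t k 0 := by
            rw [PySem.List.pyGetD_eq_getElem _ _ (by omega) (by simp; omega),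
              PySem.List.pyGetD_eq_getElem _ _ (by omega) (by omega)]
            exact List.getElem_append_left (by omega)
          rw [h1, h2]
        rw [List.map_congr_left hmap, ih]
        have hlast1 : PySem.List.pyGetD (t ++ [c]) ((t.length : Nat) : Int) 0 = c := by
          rw [PySem.List.pyGetD_eq_getElem _ _ (by omega) (by simp)]
          simp
        have hlast2 : (t ++ [c]).take (((t.length : Nat) : Int)).toNat = t := by
          simp
        rw [List.map_singleton, hlast1, hlast2, c3_append_singleton vB t c]
        have hvb : (fun y z => vB y z c) = (fun y z => decide (c < y + z)) := rfl
        rw [hvb]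
        push_cast
        simp

theorem choose2_aux (k : Nat) : 2 * ((k + 2).choose 2) = (k + 2) * (k + 1) := by
  induction k with
  | zero => decide
  | succ k ih =>
      have h := Nat.choose_succ_succ (k + 2) 1
      rw [Nat.choose_one_right] at h
      calc 2 * ((k + 1 + 2).choose 2) = 2 * (k + 2) + 2 * ((k + 2).choose 2) := by
            rw [show k + 1 + 2 = k + 2 + 1 from rfl, h]; ring
        _ = 2 * (k + 2) + (k + 2) * (k + 1) := by rw [ih]
        _ = (k + 1 + 2) * (k + 1 + 1) := by ring

theorem choose3_aux (k : Nat) : 6 * ((k + 2).choose 3) = (k + 2) * (k + 1) * k := by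
  induction k with
  | zero => decide
  | succ k ih =>
      have h := Nat.choose_succ_succ (k + 2) 2
      have h2 := choose2_aux k
      calc 6 * ((k + 1 + 2).choose 3)
          = 6 * ((k + 2).choose 2) + 6 * ((k + 2).choose 3) := by
            rw [show k + 1 + 2 = k + 2 + 1 from rfl, h]; ring
        _ = 3 * ((k + 2) * (k + 1)) + (k + 2) * (k + 1) * k := by omega
        _ = (k + 1 + 2) * (k + 1 + 1) * (k + 1) := by ring

theorem choose3_int (m : Nat) :
    PySem.Int.floordiv ((m : Int) * ((m : Int) - 1) * ((m : Int) - 2)) 6 = (m.choose 3 : Int) := by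
  rcases Nat.lt_or_ge m 2 with h | h
  · interval_cases m <;> decide
  · obtain ⟨k, rfl⟩ : ∃ k, m = k + 2 := ⟨m - 2, by omega⟩
    have hcast : ((k + 2 : Nat) : Int) * (((k + 2 : Nat) : Int) - 1) * (((k + 2 : Nat) : Int) - 2)
        = (((k + 2) * (k + 1) * k : Nat) : Int) := by push_cast; ring
    rw [hcast, show (6 : Int) = ((6 : Nat) : Int) by norm_num, PySem.Int.floordiv_natCast]
    have h6 : (k + 2) * (k + 1) * k / 6 = (k + 2).choose 3 := by
      have := choose3_aux k
      omega
    rw [h6]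

theorem zdegen_alt_eq (tab : List Int) :
    zdegen_alt tab = ((tab.length.choose 3 : Int))
        - (c3 vB (PySem.List.sorted tab (fun x => x) false) : Int) := by
  have hperm : (PySem.List.sorted tab (fun x => x) false).Perm tab :=
    PySem.List.sorted_perm tab (fun x => x) false
  have hpair : (PySem.List.sorted tab (fun x => x) false).Pairwise (· ≤ ·) :=
    PySem.List.sorted_pairwise tab (fun x => x)
  have hunfold : zdegen_alt tab
      = PySem.Int.floordiv
          ((PySem.List.len (PySem.List.sorted tab (fun x => x) false))
            * ((PySem.List.len (PySem.List.sorted tab (fun x => x) false)) - 1)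
            * ((PySem.List.len (PySem.List.sorted tab (fun x => x) false)) - 2)) 6
        - (PySem.List.pyRange 2 (PySem.List.len (PySem.List.sorted tab (fun x => x) false))).foldl
            (fun v k => twoPtr (PySem.List.sorted tab (fun x => x) false)
              (PySem.List.pyGetD (PySem.List.sorted tab (fun x => x) false) k 0) 0 (k - 1) v) 0 := rfl
  rw [hunfold]
  have hcongr : ∀ (v : Int), ∀ k ∈ PySem.List.pyRange 2
        (PySem.List.len (PySem.List.sorted tab (fun x => x) false)),
      twoPtr (PySem.List.sorted tab (fun x => x) false)
          (PySem.List.pyGetD (PySem.List.sorted tab (fun x => x) false) k 0) 0 (k - 1) v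
        = v + (cp (fun y z => decide (PySem.List.pyGetD (PySem.List.sorted tab (fun x => x) false) k 0 < y + z))
            ((PySem.List.sorted tab (fun x => x) false).take k.toNat) : Int) := by
    intro v k hk
    obtain ⟨hk2, hkl⟩ := PySem.List.mem_pyRange_one.mp hk
    rw [PySem.List.len_eq] at hkl
    rw [twoPtr_spec (PySem.List.sorted tab (fun x => x) false) hpair
      (PySem.List.pyGetD (PySem.List.sorted tab (fun x => x) false) k 0)
      (k - 1).toNat 0 (k - 1) v (le_refl 0) (by omega) (by omega)]
    have h5 : (k - 1 + 1 - 0 : Int) = k := by ring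
    rw [h5]
    norm_num
  rw [PySem.List.foldl_congr_mem _ _ _ 0 hcongr, PySem.List.foldl_add, PySem.List.len_eq,
    valid_sum (PySem.List.sorted tab (fun x => x) false), hperm.length_eq, choose3_int tab.length]
  ring

-- ===== VERDICT (by name: the statement is the Claim_ definition above) =====
theorem zdegen_spec : Claim_equal_zdegen := by
  intro tab _
  unfold Spec_zdegen
  have hperm : (PySem.List.sorted tab (fun x => x) false).Perm tab :=
    PySem.List.sorted_perm tab (fun x => x) false
  have hpair : (PySem.List.sorted tab (fun x => x) false).Pairwise (· ≤ ·) :=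
    PySem.List.sorted_pairwise tab (fun x => x)
  have h12 : ∀ a b c : Int, pB a b c = pB b a c := fun a b c => by
    simp only [pB, decide_eq_decide]
    omega
  have h23 : ∀ a b c : Int, pB a b c = pB a c b := fun a b c => by
    simp only [pB, decide_eq_decide]
    omega
  have h1 : zdegen tab = (c3 pB tab : Int) := zdegen_eq_c3 tab
  have h2 : c3 pB tab = c3 pB (PySem.List.sorted tab (fun x => x) false) :=
    (c3_perm pB h12 h23 hperm).symm
  have h3 : c3 pB (PySem.List.sorted tab (fun x => x) false)
      = c3 (fun a b c => !vB a b c) (PySem.List.sorted tab (fun x => x) false) :=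
    c3_sorted_pB _ hpair
  have h4 := c3_compl vB (PySem.List.sorted tab (fun x => x) false)
  have hlen : (PySem.List.sorted tab (fun x => x) false).length = tab.length :=
    hperm.length_eq
  rw [hlen] at h4
  rw [zdegen_alt_eq tab, h1, h2, h3]
  omega
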